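-- pv_equiv track=rewrite | github.com/DreamJJW/programmers | pushString.py | solution
-- ===== SOURCE A (Python) =====
-- def solution(A, B):
--     answer = 0
--     while True:
--         if A == B:
--             return answer
--         A = A[-1] + A[:-1]
--         answer += 1
--         if answer == len(A):
--             return -1
-- ===== SOURCE B (Python) =====
-- def solution(A, B):
--     # Alternative algorithm: rotating A right by k matches B exactly when A occurs in B+B at index k;
--     # str.find returns the smallest such k (or -1).
--     if len(A) != len(B):
--         return -1
--     return (B + B).find(A)
-- ===== Notes on version B (the rewrite author's own statement) =====
-- stated objective: faster
-- what changed: Replaces the rotate-and-compare loop (one rotation plus full string comparison per step) with a single substring search of A in B+B, whose index is exactly the rotation count.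
-- outside the precondition, e.g. on solution('', 'x'): A raises IndexError, B returns -1
import Mathlib
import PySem

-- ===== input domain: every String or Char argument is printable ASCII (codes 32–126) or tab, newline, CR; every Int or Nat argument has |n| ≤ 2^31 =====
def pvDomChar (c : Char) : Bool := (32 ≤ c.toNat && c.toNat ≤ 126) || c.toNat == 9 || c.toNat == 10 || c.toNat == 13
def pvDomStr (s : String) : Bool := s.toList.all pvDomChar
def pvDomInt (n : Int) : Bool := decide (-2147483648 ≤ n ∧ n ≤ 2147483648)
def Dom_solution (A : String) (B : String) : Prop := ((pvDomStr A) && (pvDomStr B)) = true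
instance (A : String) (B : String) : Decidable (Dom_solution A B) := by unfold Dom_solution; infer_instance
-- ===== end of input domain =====

-- B replaces A's rotate-and-compare loop by a single substring search of A in B+B, whose match index is the rotation count;
-- Pre_ excludes A = "" with B ≠ "", where the Python A raises IndexError on A[-1].


-- ===== PORT A =====
-- literal transliteration of A's while-loop; fuel = len(A) bounds the loop (the Python
-- performs at most len(A) iterations); the 'none' branch marks the IndexError of A[-1]
-- on empty A (excluded by Pre_solution below).
def solLoop (b curA : List Char) (answer : Int) (fuel : Nat) : Int :=
  if curA = b then answer
  else
    match PySem.List.pyGet? curA (-1) with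
    | none => 0  -- Python raises IndexError here (A = ""); outside Pre_solution
    | some c =>
      let A' := c :: PySem.List.slice curA none (some (-1))
      if answer + 1 = (A'.length : Int) then -1
      else
        match fuel with
        | 0 => -1  -- unreachable: fuel = len(A) suffices
        | f + 1 => solLoop b A' (answer + 1) f

def solution (A : String) (B : String) : Int :=
  solLoop B.toList A.toList 0 A.toList.length

-- ===== PORT B =====
def solution_alt (A : String) (B : String) : Int :=
  if A.toList.length ≠ B.toList.length then -1
  else PySem.Str.find (B ++ B) A

-- ===== PRECONDITION & SPEC =====
-- Pre_ excludes exactly A = "" with B ≠ "", where the Python A raises IndexError on A[-1].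
def Pre_solution (A : String) (B : String) : Prop := ¬ (A = "" ∧ B ≠ "")
instance (A : String) (B : String) : Decidable (Pre_solution A B) := by unfold Pre_solution; infer_instance
def pvWitness_solution : String × String := ("abc", "cab")

def Spec_solution (A : String) (B : String) (out : Int) : Prop := out = solution_alt A B
instance (A : String) (B : String) (out : Int) : Decidable (Spec_solution A B out) := by unfold Spec_solution; infer_instance

-- ===== CLAIM (what is proved, stated in full; the proofs are below) =====
def Claim_equal_solution : Prop := ∀ (A : String) (B : String), Dom_solution A B → Pre_solution A B → Spec_solution A B (solution A B)

-- ===== LEMMAS AND PROOFS =====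

-- lengths-differ case: the loop never matches and returns -1
lemma solLoop_ne_length (b : List Char) :
    ∀ (fuel : Nat) (curA : List Char) (answer : Int), curA ≠ [] → curA.length ≠ b.length →
      solLoop b curA answer fuel = -1 := by
  intro fuel
  induction fuel with
  | zero =>
    intro curA answer hne hlen
    match curA, hne with
    | c :: cs, _ =>
      rw [solLoop]
      simp only [PySem.List.pyGet?_neg_one]
      rw [if_neg (by intro h; exact hlen (by rw [h])), List.getLast?_eq_some_getLast (by simp)]
      split
      · simp_all
      · split <;> rfl
  | succ f ih =>
    intro curA answer hne hlen
    match curA, hne with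
    | c :: cs, _ =>
      rw [solLoop]
      simp only [PySem.List.pyGet?_neg_one]
      rw [if_neg (by intro h; exact hlen (by rw [h])), List.getLast?_eq_some_getLast (by simp)]
      split
      · simp_all
      · split
        · rfl
        · apply ih _ _ (by simp)
          simpa [PySem.List.slice_to_neg_one] using hlen

-- rotating right by k matches b exactly when a is a prefix of (b ++ b).drop k
lemma rot_iff_prefix (a b : List Char) (k : Nat) (hk : k ≤ a.length) (hlen : a.length = b.length) :
    (a.drop (a.length - k) ++ a.take (a.length - k) = b) ↔ a <+: (b ++ b).drop k := by
  have hkb : k ≤ b.length := hlen ▸ hk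
  have h1 : (b ++ b).drop k = b.drop k ++ b := List.drop_append_of_le_length hkb
  have h2 : (b.drop k ++ b).take a.length = b.drop k ++ b.take k := by
    rw [List.take_append]
    rw [List.take_of_length_le (by simp; omega)]
    congr 1
    simp
    omega
  rw [h1, List.prefix_iff_eq_take, h2]
  constructor
  · intro h
    have e1 : b.drop k = a.take (a.length - k) := by
      rw [← h, List.drop_left' (by simp; omega)]
    have e2 : b.take k = a.drop (a.length - k) := by
      rw [← h, List.take_left' (by simp; omega)]
    rw [e1, e2, List.take_append_drop]
  · intro h
    have e1 : a.drop (a.length - k) = b.take k := by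
      rw [h, List.drop_left' (by simp; omega)]
    have e2 : a.take (a.length - k) = b.drop k := by
      rw [h, List.take_left' (by simp; omega)]
    rw [e1, e2, List.take_append_drop]

lemma rot_next (a : List Char) (j : Nat) (hj : j + 1 ≤ a.length) :
    ((a.drop (a.length - j) ++ a.take (a.length - j)).drop
        ((a.drop (a.length - j) ++ a.take (a.length - j)).length - 1))
      ++ ((a.drop (a.length - j) ++ a.take (a.length - j)).take
        ((a.drop (a.length - j) ++ a.take (a.length - j)).length - 1))
    = a.drop (a.length - (j+1)) ++ a.take (a.length - (j+1)) := by
  set n := a.length with hn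
  set i := n - j with hi
  have hlen : (a.drop i ++ a.take i).length = n := by simp [hi]; omega
  rw [hlen]
  have hd1 : (a.drop i).length = n - i := by simp [hn]
  have h1 : (a.drop i ++ a.take i).drop (n-1) = (a.take i).drop (i-1) := by
    rw [List.drop_append]
    rw [List.drop_of_length_le (by rw [hd1]; omega)]
    simp only [List.nil_append]
    congr 1
    rw [hd1]
    omega
  have h2 : (a.drop i ++ a.take i).take (n-1) = a.drop i ++ a.take (i-1) := by
    rw [List.take_append]
    rw [List.take_of_length_le (by omega)]
    congr 1
    rw [List.take_take]
    congr 1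
    omega
  have h3 : (a.take i).drop (i-1) = (a.drop (i-1)).take 1 := by
    rw [List.drop_take]
    congr 1
    omega
  have h4 : a.drop (i-1) = a[i-1] :: a.drop i := by
    rw [List.drop_eq_getElem_cons (by omega)]
    congr 2
    omega
  rw [h1, h2, h3, h4]
  have h5 : a.length - (j+1) = i - 1 := by omega
  rw [h5, h4]
  simp

lemma rot_step' (x : List Char) (hx : x ≠ []) :
    (x.getLast hx :: PySem.List.slice x none (some (-1)))
      = x.drop (x.length - 1) ++ x.take (x.length - 1) := by
  rw [PySem.List.slice_to_neg_one, List.drop_length_sub_one hx, List.dropLast_eq_take]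
  rfl

lemma solLoop_inv (a b : List Char) (hlen : a.length = b.length) (hne : a ≠ []) :
    ∀ (fuel : Nat) (j : Nat), j < a.length → a.length ≤ j + fuel + 1 →
      solLoop b (a.drop (a.length - j) ++ a.take (a.length - j)) (j : Int) fuel
        = (if h : ∃ k < a.length, j ≤ k ∧ a.drop (a.length - k) ++ a.take (a.length - k) = b
           then ((Nat.find h : Nat) : Int) else -1) := by
  intro fuel
  induction fuel with
  | zero =>
    intro j hj hfuel
    by_cases hb : a.drop (a.length - j) ++ a.take (a.length - j) = b
    · rw [solLoop, if_pos hb]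
      have hex : ∃ k < a.length, j ≤ k ∧ a.drop (a.length - k) ++ a.take (a.length - k) = b :=
        ⟨j, hj, le_refl j, hb⟩
      rw [dif_pos hex]
      congr 1
      symm
      rw [Nat.find_eq_iff]
      exact ⟨⟨hj, le_refl j, hb⟩, fun m hm hc => by omega⟩
    · have hn0 : 0 < a.length := List.length_pos_of_ne_nil hne
      have hx : a.drop (a.length - j) ++ a.take (a.length - j) ≠ [] := by
        intro h
        have := congrArg List.length h
        rw [List.length_append, List.length_drop, List.length_take, List.length_nil] at this
        omega
      rw [solLoop, if_neg hb, PySem.List.pyGet?_neg_one, List.getLast?_eq_some_getLast hx]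
      split
      · simp_all
      rename_i c heq
      injection heq with heq
      subst heq
      have hstep : ((a.drop (a.length - j) ++ a.take (a.length - j)).getLast hx
            :: PySem.List.slice (a.drop (a.length - j) ++ a.take (a.length - j)) none (some (-1)))
          = a.drop (a.length - (j+1)) ++ a.take (a.length - (j+1)) := by
        rw [rot_step']
        exact rot_next a j (by omega)
      have hlen' : (a.drop (a.length - (j+1)) ++ a.take (a.length - (j+1))).length = a.length := by
        rw [List.length_append, List.length_drop, List.length_take]
        omega
      simp only [hstep, hlen']
      rw [if_pos (by omega)]
      rw [dif_neg]
      rintro ⟨k, hk, hjk, hrb⟩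
      have : k = j := by omega
      exact hb (this ▸ hrb)
  | succ f ih =>
    intro j hj hfuel
    by_cases hb : a.drop (a.length - j) ++ a.take (a.length - j) = b
    · rw [solLoop, if_pos hb]
      have hex : ∃ k < a.length, j ≤ k ∧ a.drop (a.length - k) ++ a.take (a.length - k) = b :=
        ⟨j, hj, le_refl j, hb⟩
      rw [dif_pos hex]
      congr 1
      symm
      rw [Nat.find_eq_iff]
      exact ⟨⟨hj, le_refl j, hb⟩, fun m hm hc => by omega⟩
    · have hn0 : 0 < a.length := List.length_pos_of_ne_nil hne
      have hx : a.drop (a.length - j) ++ a.take (a.length - j) ≠ [] := by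
        intro h
        have := congrArg List.length h
        rw [List.length_append, List.length_drop, List.length_take, List.length_nil] at this
        omega
      rw [solLoop, if_neg hb, PySem.List.pyGet?_neg_one, List.getLast?_eq_some_getLast hx]
      split
      · simp_all
      rename_i c heq
      injection heq with heq
      subst heq
      have hstep : ((a.drop (a.length - j) ++ a.take (a.length - j)).getLast hx
            :: PySem.List.slice (a.drop (a.length - j) ++ a.take (a.length - j)) none (some (-1)))
          = a.drop (a.length - (j+1)) ++ a.take (a.length - (j+1)) := by
        rw [rot_step']
        exact rot_next a j (by omega)
      have hlen' : (a.drop (a.length - (j+1)) ++ a.take (a.length - (j+1))).length = a.length := by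
        rw [List.length_append, List.length_drop, List.length_take]
        omega
      simp only [hstep, hlen']
      by_cases hend : j + 1 = a.length
      · rw [if_pos (by omega)]
        rw [dif_neg]
        rintro ⟨k, hk, hjk, hrb⟩
        have : k = j := by omega
        exact hb (this ▸ hrb)
      · rw [if_neg (by omega)]
        have hcast : ((j : Int) + 1) = (((j+1 : Nat)) : Int) := by push_cast; ring
        rw [hcast, ih (j+1) (by omega) (by omega)]
        by_cases hex : ∃ k < a.length, j + 1 ≤ k ∧ a.drop (a.length - k) ++ a.take (a.length - k) = b
        · have hex2 : ∃ k < a.length, j ≤ k ∧ a.drop (a.length - k) ++ a.take (a.length - k) = b := by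
            obtain ⟨k, hk, hjk, hrb⟩ := hex
            exact ⟨k, hk, by omega, hrb⟩
          rw [dif_pos hex, dif_pos hex2]
          congr 1
          apply le_antisymm
          · obtain ⟨hk2, hjk2, hrb2⟩ := Nat.find_spec hex2
            have hne' : Nat.find hex2 ≠ j := by
              intro h
              exact hb (h ▸ hrb2)
            exact Nat.find_le ⟨hk2, by omega, hrb2⟩
          · obtain ⟨hk1, hjk1, hrb1⟩ := Nat.find_spec hex
            exact Nat.find_le ⟨hk1, by omega, hrb1⟩
        · rw [dif_neg hex, dif_neg]
          rintro ⟨k, hk, hjk, hrb⟩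
          rcases Nat.eq_or_lt_of_le hjk with h | h
          · exact hb (h ▸ hrb)
          · exact hex ⟨k, hk, by omega, hrb⟩

-- ===== VERDICT (by name: the statement is the Claim_ definition above) =====
theorem solution_spec : Claim_equal_solution := by
  intro A B _ hpre
  by_cases hA : A = ""
  · have hB : B = "" := by
      by_contra h
      exact hpre ⟨hA, h⟩
    subst hA; subst hB
    decide
  · have ha : A.toList ≠ [] := by
      intro h
      exact hA (by rwa [← String.toList_eq_nil_iff])
    unfold Spec_solution solution solution_alt
    by_cases hlen : A.toList.length = B.toList.length
    · rw [if_neg (by omega)]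
      have hn0 : 0 < A.toList.length := List.length_pos_of_ne_nil ha
      have h0 : A.toList.drop (A.toList.length - 0) ++ A.toList.take (A.toList.length - 0) = A.toList := by
        rw [Nat.sub_zero, List.drop_length, List.take_length, List.nil_append]
      have hmain := solLoop_inv A.toList B.toList hlen ha A.toList.length 0 hn0 (by omega)
      rw [h0] at hmain
      have hcast0 : ((0 : Nat) : Int) = (0 : Int) := rfl
      rw [hcast0] at hmain
      rw [hmain]
      have hfind : PySem.Str.find (B ++ B) A = PySem.Chars.find (B.toList ++ B.toList) A.toList := by
        simp
      rw [hfind]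
      by_cases hocc : A.toList <:+: (B.toList ++ B.toList)
      · have hfnn : 0 ≤ PySem.Chars.find (B.toList ++ B.toList) A.toList :=
          (PySem.Chars.find_nonneg_iff _ _).mpr hocc
        obtain ⟨hpref, hmin⟩ := PySem.Chars.find_spec hfnn
        have hle := PySem.Chars.find_le_length (B.toList ++ B.toList) A.toList
        have hilen : A.toList.length ≤ ((B.toList ++ B.toList).drop (PySem.Chars.find (B.toList ++ B.toList) A.toList).toNat).length :=
          hpref.length_le
        rw [List.length_drop, List.length_append] at hilen
        have hi_lt : (PySem.Chars.find (B.toList ++ B.toList) A.toList).toNat < B.toList.length := by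
          rcases Nat.lt_or_ge (PySem.Chars.find (B.toList ++ B.toList) A.toList).toNat B.toList.length with h | h
          · exact h
          · exfalso
            have hieq : (PySem.Chars.find (B.toList ++ B.toList) A.toList).toNat = B.toList.length := by omega
            rw [hieq, List.drop_left' rfl] at hpref
            have hab : A.toList = B.toList := hpref.eq_of_length hlen
            have h00 : A.toList <+: (B.toList ++ B.toList).drop 0 := by
              rw [List.drop_zero, hab]
              exact List.prefix_append _ _
            exact hmin 0 (by omega) h00
        have hrot : A.toList.drop (A.toList.length - (PySem.Chars.find (B.toList ++ B.toList) A.toList).toNat)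
              ++ A.toList.take (A.toList.length - (PySem.Chars.find (B.toList ++ B.toList) A.toList).toNat) = B.toList :=
          (rot_iff_prefix A.toList B.toList _ (by omega) hlen).mpr hpref
        have hex : ∃ k < A.toList.length, 0 ≤ k ∧
            A.toList.drop (A.toList.length - k) ++ A.toList.take (A.toList.length - k) = B.toList :=
          ⟨_, by omega, Nat.zero_le _, hrot⟩
        rw [dif_pos hex]
        have hfd : Nat.find hex = (PySem.Chars.find (B.toList ++ B.toList) A.toList).toNat := by
          rw [Nat.find_eq_iff]
          refine ⟨⟨by omega, Nat.zero_le _, hrot⟩, ?_⟩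
          rintro m hm ⟨hmn, _, hrm⟩
          exact hmin m hm ((rot_iff_prefix A.toList B.toList m (by omega) hlen).mp hrm)
        rw [hfd]
        exact Int.toNat_of_nonneg hfnn
      · rw [dif_neg, (PySem.Chars.find_eq_neg_one_iff _ _).mpr hocc]
        rintro ⟨k, hk, _, hrb⟩
        have hp := (rot_iff_prefix A.toList B.toList k (by omega) hlen).mp hrb
        exact hocc (hp.isInfix.trans (List.drop_suffix k _).isInfix)
    · rw [if_pos (by omega)]
      exact solLoop_ne_length B.toList A.toList.length A.toList 0 ha hlen
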